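-- pv_equiv track=rewrite | github.com/stfc-aeg/mercury-detector | control/src/mercury/loki_carrier/hexitec_mhz_asic.py | convert_8b_16b
-- ===== SOURCE A (Python) =====
-- def convert_8b_16b(array_8b):
--     array_out = []
--     word_16b = 0
--     for i in range(len(array_8b)):
--         word_8b = array_8b[i]
--
--         if i % 2 == 0:
--             # Top byte
--             word_16b = 0 | (word_8b << 8)
--         else:
--             # Bottom byte
--             word_16b = word_16b | word_8b
--             array_out.append(word_16b)
--
--     return array_out
-- ===== SOURCE B (Python) =====
-- def convert_8b_16b(array_8b):
--     # Pair even-index (high) bytes with odd-index (low) bytes directly;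
--     # zip truncation drops an unpaired trailing byte, as in the original.
--     return [(hi << 8) | lo for hi, lo in zip(array_8b[0::2], array_8b[1::2])]
-- ===== Notes on version B (the rewrite author's own statement) =====
-- stated objective: idiomatic
-- what changed: Replaces the index loop with its i%2 parity branch and carried word_16b state by zipping the even-index byte slice with the odd-index byte slice and combining each (hi, lo) pair in one comprehension.
import Mathlib
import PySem

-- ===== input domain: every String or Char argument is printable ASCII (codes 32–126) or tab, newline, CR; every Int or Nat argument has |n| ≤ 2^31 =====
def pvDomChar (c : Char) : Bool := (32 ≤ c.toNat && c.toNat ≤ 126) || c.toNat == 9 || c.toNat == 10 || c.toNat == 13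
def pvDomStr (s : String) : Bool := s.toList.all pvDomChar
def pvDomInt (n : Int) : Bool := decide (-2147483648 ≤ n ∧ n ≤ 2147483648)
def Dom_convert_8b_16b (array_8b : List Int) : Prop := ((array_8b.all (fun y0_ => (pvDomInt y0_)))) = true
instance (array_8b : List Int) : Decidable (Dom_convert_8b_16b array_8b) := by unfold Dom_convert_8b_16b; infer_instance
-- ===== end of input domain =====

-- B replaces A's parity-tracking index loop by zipping the even-index and odd-index slices (idiomatic; same O(n) cost).


-- ===== PORT A =====
-- for i in range(len(array_8b)): parity branch on i % 2, carried word_16b state, append on odd i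
def convert_8b_16b (array_8b : List Int) : List Int :=
  ((PySem.List.pyRange 0 ((array_8b.length : Nat) : Int) 1).foldl
    (fun (st : List Int × Int) i =>
      let word_8b := PySem.List.pyGetD array_8b i 0
      if PySem.Int.mod i 2 = 0 then
        (st.1, PySem.Int.bor 0 (word_8b <<< (8:Nat)))
      else
        let word_16b := PySem.Int.bor st.2 word_8b
        (st.1 ++ [word_16b], word_16b))
    ([], 0)).1

-- ===== PORT B =====
-- [(hi << 8) | lo for hi, lo in zip(array_8b[0::2], array_8b[1::2])]
def convert_8b_16b_alt (array_8b : List Int) : List Int :=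
  let evens := (PySem.List.slice? array_8b (some 0) none 2).getD []
  let odds := (PySem.List.slice? array_8b (some 1) none 2).getD []
  (evens.zip odds).map (fun (p : Int × Int) => PySem.Int.bor (p.1 <<< (8:Nat)) p.2)

-- ===== PRECONDITION & SPEC =====
def Spec_convert_8b_16b (array_8b : List Int) (out : List Int) : Prop := out = convert_8b_16b_alt array_8b
instance (array_8b : List Int) (out : List Int) : Decidable (Spec_convert_8b_16b array_8b out) := by unfold Spec_convert_8b_16b; infer_instance

-- ===== CLAIM (what is proved, stated in full; the proofs are below) =====
def Claim_equal_convert_8b_16b : Prop := ∀ (array_8b : List Int), Dom_convert_8b_16b array_8b → Spec_convert_8b_16b array_8b (convert_8b_16b array_8b)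

-- ===== LEMMAS AND PROOFS =====

-- even-index / odd-index elements, structurally
def pvEvens {α : Type} : List α → List α
  | [] => []
  | [x] => [x]
  | x :: _ :: rest => x :: pvEvens rest

def pvOdds {α : Type} : List α → List α
  | [] => []
  | [_] => []
  | _ :: y :: rest => y :: pvOdds rest

-- common reference: combine consecutive pairs, dropping an unpaired trailing byte
def pvPairs : List Int → List Int
  | [] => []
  | [_] => []
  | x :: y :: rest => PySem.Int.bor (x <<< (8:Nat)) y :: pvPairs rest

theorem pv_filterMap_evens {α : Type} : ∀ (xs : List α),
    (List.range ((xs.length + 1) / 2)).filterMap (fun k => xs[2 * k]?) = pvEvens xs := by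
  intro xs
  induction xs using pvEvens.induct with
  | case1 => simp [pvEvens]
  | case2 x => simp [pvEvens]
  | case3 x y rest ih =>
    have h : ((x :: y :: rest).length + 1) / 2 = (rest.length + 1) / 2 + 1 := by
      simp; omega
    rw [h, List.range_succ_eq_map, List.filterMap_cons, List.filterMap_map]
    have hf : (fun k => (x :: y :: rest)[2 * k]?) ∘ Nat.succ = fun k => rest[2 * k]? := by
      funext k
      show (x :: y :: rest)[2 * Nat.succ k]? = rest[2 * k]?
      rw [show 2 * Nat.succ k = 2 * k + 1 + 1 from by omega]
      simp [List.getElem?_cons_succ]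
    rw [hf, ih]
    simp [pvEvens]

theorem pv_filterMap_odds {α : Type} : ∀ (xs : List α),
    (List.range (xs.length / 2)).filterMap (fun k => xs[2 * k + 1]?) = pvOdds xs := by
  intro xs
  induction xs using pvOdds.induct with
  | case1 => simp [pvOdds]
  | case2 x => simp [pvOdds]
  | case3 x y rest ih =>
    have h : (x :: y :: rest).length / 2 = rest.length / 2 + 1 := by
      simp; omega
    rw [h, List.range_succ_eq_map, List.filterMap_cons, List.filterMap_map]
    have hf : (fun k => (x :: y :: rest)[2 * k + 1]?) ∘ Nat.succ = fun k => rest[2 * k + 1]? := by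
      funext k
      show (x :: y :: rest)[2 * Nat.succ k + 1]? = rest[2 * k + 1]?
      rw [show 2 * Nat.succ k + 1 = 2 * k + 1 + 1 + 1 from by omega]
      simp [List.getElem?_cons_succ]
    rw [hf, ih]
    simp [pvOdds]

theorem pv_slice_evens {α : Type} (xs : List α) :
    PySem.List.slice? xs (some 0) none 2 = some (pvEvens xs) := by
  rw [← pv_filterMap_evens xs]
  simp only [PySem.List.slice?, PySem.List.sliceIndices]
  norm_num
  rw [show (if 0 < xs.length then (((xs.length : Int) + 2 - 1) / 2).toNat else 0) = (xs.length + 1) / 2 from by split <;> omega]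
  exact List.filterMap_congr (fun k _ => by rw [show ((2 * (k : Int))).toNat = 2 * k from by omega])

theorem pv_slice_odds {α : Type} (xs : List α) :
    PySem.List.slice? xs (some 1) none 2 = some (pvOdds xs) := by
  rw [← pv_filterMap_odds xs]
  simp only [PySem.List.slice?, PySem.List.sliceIndices]
  norm_num
  rcases Nat.lt_or_ge xs.length 2 with h | h
  · rw [show (if 1 < xs.length then (((xs.length : Int) - min 1 (xs.length : Int) + 2 - 1) / 2).toNat else 0) = 0 from by split <;> omega,
        show xs.length / 2 = 0 from by omega]
    simp
  · rw [show (if 1 < xs.length then (((xs.length : Int) - min 1 (xs.length : Int) + 2 - 1) / 2).toNat else 0) = xs.length / 2 from by split <;> omega]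
    exact List.filterMap_congr (fun k _ => by rw [show (min 1 (xs.length : Int) + 2 * (k : Int)).toNat = 2 * k + 1 from by omega])

theorem pv_zip_pairs (xs : List Int) :
    ((pvEvens xs).zip (pvOdds xs)).map (fun (p : Int × Int) => PySem.Int.bor (p.1 <<< (8:Nat)) p.2) = pvPairs xs := by
  induction xs using pvPairs.induct with
  | case1 => simp [pvEvens, pvOdds, pvPairs]
  | case2 x => simp [pvEvens, pvOdds, pvPairs]
  | case3 x y rest ih => simp [pvEvens, pvOdds, pvPairs, ih]

theorem pv_loopA (xs : List Int) : ∀ (pre acc : List Int) (w : Int), pre.length % 2 = 0 →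
    ((PySem.List.pyRange (pre.length : Int) (((pre ++ xs).length : Nat) : Int) 1).foldl
      (fun (st : List Int × Int) i =>
        let word_8b := PySem.List.pyGetD (pre ++ xs) i 0
        if PySem.Int.mod i 2 = 0 then
          (st.1, PySem.Int.bor 0 (word_8b <<< (8:Nat)))
        else
          let word_16b := PySem.Int.bor st.2 word_8b
          (st.1 ++ [word_16b], word_16b))
      (acc, w)).1 = acc ++ pvPairs xs := by
  induction xs using pvPairs.induct with
  | case1 =>
    intro pre acc w hpar
    rw [PySem.List.pyRange_one_eq_nil (by simp)]
    simp [pvPairs]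
  | case2 x =>
    intro pre acc w hpar
    have hb : (((pre ++ [x]).length : Nat) : Int) = (pre.length : Int) + 1 := by simp
    have hm0 : PySem.Int.mod ((pre.length : Nat) : Int) 2 = 0 := by
      rw [PySem.Int.mod_eq_emod_of_pos (by norm_num)]; omega
    rw [hb, PySem.List.pyRange_one_cons (by omega), PySem.List.pyRange_one_eq_nil (by omega)]
    have hm0' : (PySem.Int.mod ((pre.length : Nat) : Int) 2 = 0) = True := eq_true hm0
    simp only [List.foldl_cons, List.foldl_nil, hm0', ite_true]
    simp [pvPairs]
  | case3 x y rest ih =>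
    intro pre acc w hpar
    have hb : (((pre ++ x :: y :: rest).length : Nat) : Int) = (pre.length : Int) + (2 + rest.length) := by
      simp; omega
    have hm0 : PySem.Int.mod ((pre.length : Nat) : Int) 2 = 0 := by
      rw [PySem.Int.mod_eq_emod_of_pos (by norm_num)]; omega
    have hm1 : PySem.Int.mod (((pre.length : Nat) : Int) + 1) 2 = 1 := by
      rw [PySem.Int.mod_eq_emod_of_pos (by norm_num)]; omega
    have hg1 : PySem.List.pyGetD (pre ++ x :: y :: rest) ((pre.length : Nat) : Int) 0 = x := by
      rw [PySem.List.pyGetD_natCast]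
      simp [List.getD_eq_getElem?_getD]
    have hg2 : PySem.List.pyGetD (pre ++ x :: y :: rest) (((pre.length : Nat) : Int) + 1) 0 = y := by
      rw [show (((pre.length : Nat) : Int) + 1) = ((pre.length + 1 : Nat) : Int) from by push_cast; ring]
      rw [PySem.List.pyGetD_natCast]
      simp [List.getD_eq_getElem?_getD, List.getElem?_append_right (by omega : pre.length ≤ pre.length + 1)]
    have h0 : PySem.Int.bor 0 (x <<< (8:Nat)) = x <<< (8:Nat) := by
      rw [PySem.Int.bor_comm]; exact PySem.Int.bor_zero _
    rw [hb, PySem.List.pyRange_one_cons (by omega), PySem.List.pyRange_one_cons (by omega)]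
    have hm0' : (PySem.Int.mod ((pre.length : Nat) : Int) 2 = 0) = True := eq_true hm0
    have hm1' : (PySem.Int.mod (((pre.length : Nat) : Int) + 1) 2 = 0) = False := by
      rw [hm1]; norm_num
    simp only [List.foldl_cons, hm0', hm1', ite_true, ite_false, hg1, hg2, h0]
    have ih' := ih (pre ++ [x, y]) (acc ++ [PySem.Int.bor (x <<< (8:Nat)) y])
      (PySem.Int.bor (x <<< (8:Nat)) y) (by simp; omega)
    have hb' : ((((pre ++ [x, y]) ++ rest).length : Nat) : Int) = (pre.length : Int) + (2 + rest.length) := by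
      simp; omega
    have hs' : (((pre ++ [x, y]).length : Nat) : Int) = (pre.length : Int) + 1 + 1 := by
      simp; ring
    rw [hb', hs'] at ih'
    simp only [List.append_assoc, List.cons_append, List.nil_append] at ih'
    rw [ih']
    simp [pvPairs]

-- ===== VERDICT (by name: the statement is the Claim_ definition above) =====
theorem convert_8b_16b_spec : Claim_equal_convert_8b_16b := by
  intro xs _
  show convert_8b_16b xs = convert_8b_16b_alt xs
  have hA := pv_loopA xs [] [] 0 (by simp)
  simp only [List.nil_append, List.length_nil, Nat.cast_zero] at hA
  rw [convert_8b_16b, hA, convert_8b_16b_alt, pv_slice_evens, pv_slice_odds]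
  simp [pv_zip_pairs]
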